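-- pv_equiv track=rewrite | github.com/Michael-Pytel/PosePro | static/backend-scripts/exercise_processor/working_pipeline/landmark_extraction.py | build_chunks_equal_to_workers
-- ===== SOURCE A (Python) =====
-- from dataclasses import dataclass
--
-- @dataclass(frozen=True)
-- class ChunkSpec:
--     start: int
--     end: int
--     overlap: int
--
-- def build_chunks_equal_to_workers(nframes, num_workers, overlap):
--
--     workers = min(num_workers, nframes)
--     base = nframes // workers
--     remainder = nframes % workers
--
--     chunks = []
--     start = 0
--     for i in range(workers):
--         length = base + (1 if i < remainder else 0)
--         end = start + length
--         chunks.append(ChunkSpec(start=start, end=end, overlap=overlap))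
--         start = end
--     return chunks
-- ===== SOURCE B (Python) =====
-- from dataclasses import dataclass
--
-- @dataclass(frozen=True)
-- class ChunkSpec:
--     start: int
--     end: int
--     overlap: int
--
-- def build_chunks_equal_to_workers(nframes, num_workers, overlap):
--     workers = min(num_workers, nframes)
--     base = nframes // workers
--     remainder = nframes % workers
--     return [ChunkSpec(start=i * base + min(i, remainder),
--                       end=(i + 1) * base + min(i + 1, remainder),
--                       overlap=overlap)
--             for i in range(workers)]
-- ===== Notes on version B (the rewrite author's own statement) =====
-- stated objective: simpler
-- what changed: Replaced the running-start accumulator loop by a single comprehension computing each chunk's bounds from its index via the closed form start = i*base + min(i, remainder), end = (i+1)*base + min(i+1, remainder).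
import Mathlib
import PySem

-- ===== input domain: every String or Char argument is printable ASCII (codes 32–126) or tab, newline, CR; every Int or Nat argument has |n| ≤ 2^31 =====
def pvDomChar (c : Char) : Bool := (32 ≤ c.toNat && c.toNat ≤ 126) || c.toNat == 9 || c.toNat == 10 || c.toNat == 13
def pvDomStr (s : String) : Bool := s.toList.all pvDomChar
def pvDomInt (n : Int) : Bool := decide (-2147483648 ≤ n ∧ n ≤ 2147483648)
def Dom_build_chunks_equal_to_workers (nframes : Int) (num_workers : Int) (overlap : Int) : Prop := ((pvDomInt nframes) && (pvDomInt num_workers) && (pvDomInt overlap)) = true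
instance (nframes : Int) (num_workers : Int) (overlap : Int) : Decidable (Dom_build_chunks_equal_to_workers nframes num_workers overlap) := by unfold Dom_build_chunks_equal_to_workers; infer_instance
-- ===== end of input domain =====

-- B replaces A's running-start accumulator by a closed-form per-index formula
-- (start = i*base + min i remainder) in a single list comprehension (objective: simpler).


-- ===== PORT A =====
-- ChunkSpec(start, end, overlap) is represented as the triple (start, end, overlap).
def build_chunks_equal_to_workers (nframes : Int) (num_workers : Int) (overlap : Int) : List (Int × Int × Int) :=
  let workers := min num_workers nframes
  let base := PySem.Int.floordiv nframes workers
  let remainder := PySem.Int.mod nframes workers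
  let res := (PySem.List.pyRange 0 workers 1).foldl
    (fun (st : List (Int × Int × Int) × Int) i =>
      let length := base + (if i < remainder then 1 else 0)
      let e := st.2 + length
      (st.1 ++ [(st.2, e, overlap)], e))
    ([], 0)
  res.1

-- ===== PORT B =====
def build_chunks_equal_to_workers_alt (nframes : Int) (num_workers : Int) (overlap : Int) : List (Int × Int × Int) :=
  let workers := min num_workers nframes
  let base := PySem.Int.floordiv nframes workers
  let remainder := PySem.Int.mod nframes workers
  (PySem.List.pyRange 0 workers 1).map
    (fun i => (i * base + min i remainder, (i + 1) * base + min (i + 1) remainder, overlap))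

-- ===== PRECONDITION & SPEC =====
-- Pre_ excludes exactly min(num_workers, nframes) = 0, where Python A raises ZeroDivisionError.
def Pre_build_chunks_equal_to_workers (nframes : Int) (num_workers : Int) (overlap : Int) : Prop :=
  min num_workers nframes ≠ 0
instance (nframes : Int) (num_workers : Int) (overlap : Int) : Decidable (Pre_build_chunks_equal_to_workers nframes num_workers overlap) := by unfold Pre_build_chunks_equal_to_workers; infer_instance
def pvWitness_build_chunks_equal_to_workers : Int × Int × Int := (10, 3, 2)

def Spec_build_chunks_equal_to_workers (nframes : Int) (num_workers : Int) (overlap : Int) (out : List (Int × Int × Int)) : Prop := out = build_chunks_equal_to_workers_alt nframes num_workers overlap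
instance (nframes : Int) (num_workers : Int) (overlap : Int) (out : List (Int × Int × Int)) : Decidable (Spec_build_chunks_equal_to_workers nframes num_workers overlap out) := by unfold Spec_build_chunks_equal_to_workers; infer_instance

-- ===== CLAIM (what is proved, stated in full; the proofs are below) =====
def Claim_equal_build_chunks_equal_to_workers : Prop := ∀ (nframes : Int) (num_workers : Int) (overlap : Int), Dom_build_chunks_equal_to_workers nframes num_workers overlap → Pre_build_chunks_equal_to_workers nframes num_workers overlap → Spec_build_chunks_equal_to_workers nframes num_workers overlap (build_chunks_equal_to_workers nframes num_workers overlap)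

-- ===== LEMMAS AND PROOFS =====

-- The loop invariant: folding A's loop over pyRange a w starting from start = a*base + min a rem
-- produces exactly B's map of the closed-form formula, appended to the accumulator.
theorem fold_eq_map (base rem ov : Int) (w : Int) : ∀ (a : Int) (acc : List (Int × Int × Int)),
    (PySem.List.pyRange a w 1).foldl
      (fun (st : List (Int × Int × Int) × Int) i =>
        let length := base + (if i < rem then 1 else 0)
        let e := st.2 + length
        (st.1 ++ [(st.2, e, ov)], e))
      (acc, a * base + min a rem)
    = (acc ++ (PySem.List.pyRange a w 1).map
        (fun i => (i * base + min i rem, (i + 1) * base + min (i + 1) rem, ov)),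
       w * base + min w rem ) ∨ w ≤ a := by
  intro a acc
  by_cases h : w ≤ a
  · right; exact h
  · left
    have hlt : a < w := lt_of_not_ge h
    have : ∀ n : ℕ, ∀ (a : Int) (acc : List (Int × Int × Int)), (w - a).toNat = n → a ≤ w →
        (PySem.List.pyRange a w 1).foldl
          (fun (st : List (Int × Int × Int) × Int) i =>
            let length := base + (if i < rem then 1 else 0)
            let e := st.2 + length
            (st.1 ++ [(st.2, e, ov)], e))
          (acc, a * base + min a rem)
        = (acc ++ (PySem.List.pyRange a w 1).map
            (fun i => (i * base + min i rem, (i + 1) * base + min (i + 1) rem, ov)),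
           w * base + min w rem) := by
      intro n
      induction n with
      | zero =>
        intro a acc h0 hle
        have haw : a = w := by omega
        subst haw
        simp [PySem.List.pyRange_one_eq_nil le_rfl]
      | succ k ih =>
        intro a acc h0 hle
        have haw : a < w := by omega
        rw [PySem.List.pyRange_one_cons haw]
        simp only [List.foldl_cons, List.map_cons]
        have hstep : a * base + min a rem + (base + (if a < rem then 1 else 0))
            = (a + 1) * base + min (a + 1) rem := by
          by_cases hr : a < rem
          · simp only [if_pos hr]
            have h1 : min a rem = a := min_eq_left (le_of_lt hr)
            have h2 : min (a + 1) rem = a + 1 := min_eq_left (by omega)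
            rw [h1, h2]; ring
          · simp only [if_neg hr]
            have h1 : min a rem = rem := min_eq_right (by omega)
            have h2 : min (a + 1) rem = rem := min_eq_right (by omega)
            rw [h1, h2]; ring
        have := ih (a + 1) (acc ++ [(a * base + min a rem, (a + 1) * base + min (a + 1) rem, ov)])
          (by omega) (by omega)
        rw [hstep, this, List.append_assoc]
        simp
    exact this (w - a).toNat a acc rfl (le_of_lt hlt)

-- ===== VERDICT (by name: the statement is the Claim_ definition above) =====
theorem build_chunks_equal_to_workers_spec : Claim_equal_build_chunks_equal_to_workers := by
  intro nframes num_workers overlap _ _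
  unfold Spec_build_chunks_equal_to_workers
  simp only [build_chunks_equal_to_workers, build_chunks_equal_to_workers_alt]
  by_cases hpos : 0 < min num_workers nframes
  · have hrem : 0 ≤ PySem.Int.mod nframes (min num_workers nframes) :=
      PySem.Int.mod_nonneg _ hpos
    have h0 : (([] : List (Int × Int × Int)), (0 : Int)) =
        (([] : List (Int × Int × Int)),
         0 * PySem.Int.floordiv nframes (min num_workers nframes)
           + min 0 (PySem.Int.mod nframes (min num_workers nframes))) := by
      rw [min_eq_left hrem]; norm_num
    rw [h0]
    rcases fold_eq_map (PySem.Int.floordiv nframes (min num_workers nframes))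
        (PySem.Int.mod nframes (min num_workers nframes)) overlap
        (min num_workers nframes) 0 [] with h | h
    · rw [h]; simp
    · omega
  · rw [PySem.List.pyRange_one_eq_nil (by omega : min num_workers nframes ≤ 0)]
    simp
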